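-- pv_equiv track=rewrite | github.com/edeposit/marcxml_parser | src/marcxml_parser/tools/resorted.py | resorted
-- ===== SOURCE A (Python) =====
-- def resorted(values):
--     """
--     Sort values, but put numbers after alphabetically sorted words.
--
--     This function is here to make outputs diff-compatible with Aleph.
--
--     Example::
--         >>> sorted(["b", "1", "a"])
--         ['1', 'a', 'b']
--         >>> resorted(["b", "1", "a"])
--         ['a', 'b', '1']
--
--     Args:
--         values (iterable): any iterable object/list/tuple/whatever.
--
--     Returns:
--         list of sorted values, but with numbers after words
--     """
--     if not values:
--         return values
--
--     values = sorted(values)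
--
--     # look for first word
--     first_word = next(
--         (cnt for cnt, val in enumerate(values)
--              if val and not val[0].isdigit()),
--         None
--     )
--
--     # if not found, just return the values
--     if first_word is None:
--         return values
--
--     words = values[first_word:]
--     numbers = values[:first_word]
--
--     return words + numbers
-- ===== SOURCE B (Python) =====
-- def resorted(values):
--     """Pivot-partition re-implementation: split values at the smallest word,
--     sort each part, words first."""
--     words = [v for v in values if v and not v[0].isdigit()]
--     if not words:
--         return sorted(values)
--     mw = min(words)
--     return sorted(v for v in values if v >= mw) + sorted(v for v in values if v < mw)
-- ===== Notes on version B (the rewrite author's own statement) =====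
-- stated objective: alternative
-- what changed: Instead of sorting the whole list, scanning for the first word index and rotating by slicing, B picks the smallest word as a pivot, partitions the values by comparison with it and sorts the two parts independently, concatenating words-first.
import Mathlib
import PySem

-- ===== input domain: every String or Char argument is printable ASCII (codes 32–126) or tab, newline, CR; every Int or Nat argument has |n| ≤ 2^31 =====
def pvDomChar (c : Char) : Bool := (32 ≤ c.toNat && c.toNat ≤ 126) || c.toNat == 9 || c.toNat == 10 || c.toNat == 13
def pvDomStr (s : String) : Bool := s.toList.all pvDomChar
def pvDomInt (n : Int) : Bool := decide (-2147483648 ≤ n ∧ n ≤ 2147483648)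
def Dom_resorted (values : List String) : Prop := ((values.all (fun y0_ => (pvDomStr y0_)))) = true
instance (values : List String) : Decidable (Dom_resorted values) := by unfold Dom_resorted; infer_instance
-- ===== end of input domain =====

-- B replaces A's sort-then-find-first-word-then-rotate with a pivot partition at the
-- smallest word, sorting the two parts independently (alternative decomposition, same cost).

-- 'val and not val[0].isdigit()' — the word test both Pythons share
def pvIsWord (v : String) : Bool :=
  match v.toList with
  | [] => false
  | c :: _ => !PySem.Chars.isdigit c

-- ===== PORT A =====
-- the 'next((cnt for cnt, val in enumerate(values) if val and not val[0].isdigit()), None)' generator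
def pvFirstWord : List (Int × String) → Option Int
  | [] => none
  | (cnt, val) :: rest => if pvIsWord val then some cnt else pvFirstWord rest

def resorted (values : List String) : List String :=
  if values = [] then values
  else
    let s := PySem.List.sorted values (fun v => v) false
    match pvFirstWord (PySem.List.enumerate s 0) with
    | none => s
    | some fw =>
        PySem.List.slice s (some fw) none ++ PySem.List.slice s none (some fw)

-- ===== PORT B =====
def resorted_alt (values : List String) : List String :=
  let words := values.filter (fun v => pvIsWord v)
  match PySem.List.min? words (fun v => v) with
  | none => PySem.List.sorted values (fun v => v) false
  | some mw =>
      PySem.List.sorted (values.filter (fun v => decide (mw ≤ v))) (fun v => v) false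
      ++ PySem.List.sorted (values.filter (fun v => decide (v < mw))) (fun v => v) false

-- ===== PRECONDITION & SPEC =====
def Spec_resorted (values : List String) (out : List String) : Prop := out = resorted_alt values
instance (values : List String) (out : List String) : Decidable (Spec_resorted values out) := by unfold Spec_resorted; infer_instance

-- ===== CLAIM (what is proved, stated in full; the proofs are below) =====
def Claim_equal_resorted : Prop := ∀ (values : List String), Dom_resorted values → Spec_resorted values (resorted values)

-- ===== LEMMAS AND PROOFS =====

-- If no element is a word, the generator yields nothing.
theorem pvFirstWord_none (l : List String) (h : ∀ x ∈ l, pvIsWord x = false) :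
    ∀ n : Int, pvFirstWord (PySem.List.enumerate l n) = none := by
  induction l with
  | nil => intro n; simp [PySem.List.enumerate_nil, pvFirstWord]
  | cons x t ih =>
      intro n
      rw [PySem.List.enumerate_cons]
      have hx : pvIsWord x = false := h x List.mem_cons_self
      simp only [pvFirstWord, hx, Bool.false_eq_true, if_false]
      exact ih (fun y hy => h y (List.mem_cons_of_mem _ hy)) (n + 1)

-- Main invariant on the sorted list: the first word sits exactly at the boundary
-- between the elements < mw and the elements ≥ mw (mw = the minimal word).
theorem pvSplit (mw : String) (hw : pvIsWord mw = true) :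
    ∀ (s : List String) (n : Int),
      s.Pairwise (· ≤ ·) →
      (∀ y ∈ s, pvIsWord y = true → mw ≤ y) →
      mw ∈ s →
      ∃ k : Nat,
        pvFirstWord (PySem.List.enumerate s n) = some (n + k) ∧
        s.take k = s.filter (fun v => decide (v < mw)) ∧
        s.drop k = s.filter (fun v => decide (mw ≤ v)) := by
  intro s
  induction s with
  | nil => intro n _ _ hmem; exact absurd hmem (List.not_mem_nil)
  | cons x t ih =>
      intro n hpair hmin hmem
      rcases List.pairwise_cons.mp hpair with ⟨hxle, hpt⟩
      by_cases hx : pvIsWord x = true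
      · -- head is a word: boundary is here, nothing precedes it
        have hmwx : mw ≤ x := hmin x (List.mem_cons_self) hx
        refine ⟨0, ?_, ?_, ?_⟩
        · rw [PySem.List.enumerate_cons]; simp [pvFirstWord, hx]
        · have : ∀ y ∈ x :: t, ¬ (y < mw) := by
            intro y hy
            rcases List.mem_cons.mp hy with rfl | hyt
            · exact not_lt.mpr hmwx
            · exact not_lt.mpr (le_trans hmwx (hxle y hyt))
          simp only [List.take_zero]
          symm
          rw [List.filter_eq_nil_iff]
          intro y hy; simpa using this y hy
        · simp only [List.drop_zero]
          symm
          rw [List.filter_eq_self]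
          intro y hy
          rcases List.mem_cons.mp hy with rfl | hyt
          · simpa using hmwx
          · simpa using le_trans hmwx (hxle y hyt)
      · -- head is not a word: it is strictly below mw, recurse
        have hxne : x ≠ mw := fun h => hx (h ▸ hw)
        have hmwt : mw ∈ t := by
          rcases List.mem_cons.mp hmem with rfl | h
          · exact absurd hw (by simpa using hx)
          · exact h
        have hxlt : x < mw := lt_of_le_of_ne (hxle mw hmwt) hxne
        rcases ih (n + 1) hpt (fun y hy hyw => hmin y (List.mem_cons_of_mem _ hy) hyw) hmwt
          with ⟨k, hfw, htk, hdk⟩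
        refine ⟨k + 1, ?_, ?_, ?_⟩
        · rw [PySem.List.enumerate_cons]
          have hx' : pvIsWord x = false := by simpa using hx
          simp only [pvFirstWord, hx', Bool.false_eq_true, if_false]
          rw [hfw]; congr 1; push_cast; ring
        · rw [List.take_succ_cons, List.filter_cons_of_pos (by simpa using hxlt), htk]
        · rw [List.drop_succ_cons, List.filter_cons_of_neg (by simpa using not_le.mpr hxlt), hdk]

-- sorting a filtered list = filtering the sorted list (stable sort, key = identity)
theorem pvSortedFilter (values : List String) (p : String → Bool) :
    PySem.List.sorted (values.filter p) (fun v => v) false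
      = (PySem.List.sorted values (fun v => v) false).filter p := by
  apply PySem.List.sorted_id_eq_of_perm_of_pairwise
  · exact (PySem.List.sorted_perm values (fun v => v) false).filter p
  · exact (PySem.List.sorted_pairwise values (fun v => v)).sublist List.filter_sublist

-- ===== VERDICT (by name: the statement is the Claim_ definition above) =====
theorem resorted_spec : Claim_equal_resorted := by
  intro values _
  unfold Spec_resorted resorted resorted_alt
  by_cases hnil : values = []
  · subst hnil; rfl
  · simp only [if_neg hnil]
    set s := PySem.List.sorted values (fun v => v) false with hs
    cases hmn : PySem.List.min? (values.filter (fun v => pvIsWord v)) (fun v => v) with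
    | none =>
        have hnw : ∀ x ∈ values, pvIsWord x = false := by
          have := (PySem.List.min?_eq_none_iff (values.filter (fun v => pvIsWord v)) (fun v => v)).mp hmn
          intro x hx
          by_contra h
          have : x ∈ values.filter (fun v => pvIsWord v) :=
            List.mem_filter.mpr ⟨hx, by simpa using h⟩
          simp [‹values.filter (fun v => pvIsWord v) = []›] at this
        have : pvFirstWord (PySem.List.enumerate s 0) = none :=
          pvFirstWord_none s (fun x hx => hnw x ((PySem.List.mem_sorted values _ false x).mp hx)) 0
        simp [this]
    | some mw =>
        have hmem : mw ∈ values.filter (fun v => pvIsWord v) := PySem.List.min?_mem hmn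
        have hmw : pvIsWord mw = true := by simpa using (List.mem_filter.mp hmem).2
        have hmws : mw ∈ s := (PySem.List.mem_sorted values _ false mw).mpr (List.mem_filter.mp hmem).1
        have hmin : ∀ y ∈ s, pvIsWord y = true → mw ≤ y := by
          intro y hy hyw
          exact PySem.List.min?_isMin hmn y
            (List.mem_filter.mpr ⟨(PySem.List.mem_sorted values _ false y).mp hy, by simpa using hyw⟩)
        rcases pvSplit mw hmw s 0 (by simpa [hs] using PySem.List.sorted_pairwise values (fun v => v)) hmin hmws
          with ⟨k, hfw, htk, hdk⟩
        rw [zero_add] at hfw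
        simp only [hfw]
        rw [PySem.List.slice_from_natCast, PySem.List.slice_to_natCast,
            pvSortedFilter, pvSortedFilter, ← hs, hdk, htk]
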